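-- pv_equiv track=rewrite | github.com/mingmingli916/leetcode | 2021/05/20210523_find_the_shortest_superstring.py | find_overlapping_pair
-- ===== SOURCE A (Python) =====
-- def find_overlapping_pair(s1: str, s2: str):
--     maximum = -1  # Maximum overlapping length.
--     cat = ''  # Store the concatenated string.
--
--     # Check if the suffix of `s1` matches with the prefix of `s2`.
--     for i in range(1, min(len(s1), len(s2))):
--         if s1[:i] == s2[-i:]:
--             if maximum < i:
--                 maximum = i
--                 cat = s2 + s1[i:]
--
--     for i in range(1, min(len(s1), len(s2))):
--         if s1[-i:] == s2[:i]:
--             if maximum < i: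
--                 maximum = i
--                 cat = s1 + s2[i:]
--     return maximum, cat
-- ===== SOURCE B (Python) =====
-- def find_overlapping_pair(s1: str, s2: str):
--     def max_overlap(a, b):
--         # Largest k < min(len(a), len(b)) with a[-k:] == b[:k], found in O(len(a)+len(b))
--         # via the KMP prefix function of t = b + a: overlaps are exactly the borders of t
--         # of length < min(len(a), len(b)), and the failure chain enumerates all borders.
--         if not a or not b:
--             return 0
--         t = b + a
--         n = len(t)
--         p = [0] * n
--         k = 0
--         for i in range(1, n):
--             while k and t[i] != t[k]:
--                 k = p[k - 1]
--             if t[i] == t[k]: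
--                 k += 1
--             p[i] = k
--         m = min(len(a), len(b))
--         k = p[n - 1]
--         while k >= m:
--             k = p[k - 1]
--         return k
--
--     m1 = max_overlap(s2, s1)  # prefix of s1 against suffix of s2
--     m2 = max_overlap(s1, s2)  # suffix of s1 against prefix of s2
--     if m1 < m2:
--         return m2, s1 + s2[m2:]
--     if m1:
--         return m1, s2 + s1[m1:]
--     return -1, ''
-- ===== Notes on version B (the rewrite author's own statement) =====
-- stated objective: faster
-- what changed: B replaces A's per-length slice comparisons (one O(k) slice-and-compare for every candidate overlap length k, in both directions) by the KMP prefix function of the concatenation b+a, whose failure chain enumerates all suffix-prefix overlaps, so each direction is computed in one linear pass.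
import Mathlib
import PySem

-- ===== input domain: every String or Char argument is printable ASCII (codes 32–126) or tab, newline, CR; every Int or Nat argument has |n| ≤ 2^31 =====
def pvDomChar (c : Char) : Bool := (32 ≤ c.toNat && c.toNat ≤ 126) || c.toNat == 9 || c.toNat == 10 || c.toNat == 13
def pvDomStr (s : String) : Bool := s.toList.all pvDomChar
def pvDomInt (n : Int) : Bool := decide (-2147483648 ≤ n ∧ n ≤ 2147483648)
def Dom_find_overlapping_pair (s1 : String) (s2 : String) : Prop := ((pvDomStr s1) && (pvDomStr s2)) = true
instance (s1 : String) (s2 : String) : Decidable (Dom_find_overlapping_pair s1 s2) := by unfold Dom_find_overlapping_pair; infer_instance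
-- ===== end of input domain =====

-- B replaces A's per-length slice comparisons with the KMP prefix function of b ++ a, whose
-- failure chain yields the longest suffix-prefix overlap per direction in one linear pass.

-- ===== PORT A =====
def find_overlapping_pair (s1 : String) (s2 : String) : Int × String :=
  let l1 := s1.toList
  let l2 := s2.toList
  let n : Int := min (PySem.Str.len s1) (PySem.Str.len s2)
  let st1 : Int × List Char :=
    (PySem.List.pyRange 1 n 1).foldl
      (fun st i =>
        if PySem.List.slice l1 none (some i) == PySem.List.slice l2 (some (-i)) none then
          if st.1 < i then (i, l2 ++ PySem.List.slice l1 (some i) none) else st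
        else st)
      (-1, [])
  let st2 : Int × List Char :=
    (PySem.List.pyRange 1 n 1).foldl
      (fun st i =>
        if PySem.List.slice l1 (some (-i)) none == PySem.List.slice l2 none (some i) then
          if st.1 < i then (i, l1 ++ PySem.List.slice l2 (some i) none) else st
        else st)
      st1
  (st2.1, String.ofList st2.2)

-- ===== PORT B =====
-- the `while k and t[i] != t[k]: k = p[k-1]` loop (min is only the totality guard: p[k-1] ≤ k-1)
def pvDescend (t : List Char) (p : List Nat) (c : Char) : Nat → Nat
  | 0 => 0
  | k + 1 =>
      if c == t.getD (k + 1) ' ' then k + 1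
      else pvDescend t p c (min (p.getD k 0) k)
  termination_by k => k
  decreasing_by omega

-- one iteration of the `for i in range(1, n)` body of the prefix-function construction
def pvPiStep (t : List Char) (st : List Nat × Nat) (i : Nat) : List Nat × Nat :=
  let k1 := pvDescend t st.1 (t.getD i ' ') st.2
  let k2 := if t.getD i ' ' == t.getD k1 ' ' then k1 + 1 else k1
  (st.1.set i k2, k2)

-- p = [0]*n; for i in range(1, n): ... ; the KMP prefix function of t
def pvPi (t : List Char) : List Nat :=
  ((List.range' 1 (t.length - 1)).foldl (pvPiStep t) (List.replicate t.length 0, 0)).1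

-- the `while k >= m: k = p[k-1]` failure-chain descent (min again only the totality guard)
def pvChain (p : List Nat) (m : Nat) : Nat → Nat
  | 0 => 0
  | k + 1 =>
      if m ≤ k + 1 then pvChain p m (min (p.getD k 0) k)
      else k + 1
  termination_by k => k
  decreasing_by omega

-- max_overlap(a, b): largest k < min(len a, len b) with a's k-suffix == b's k-prefix
def pvMaxOverlap (a b : List Char) : Nat :=
  if a.isEmpty || b.isEmpty then 0
  else
    let t := b ++ a
    let p := pvPi t
    let m := min a.length b.length
    pvChain p m (p.getD (t.length - 1) 0)

def find_overlapping_pair_alt (s1 : String) (s2 : String) : Int × String :=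
  let l1 := s1.toList
  let l2 := s2.toList
  let m1 := pvMaxOverlap l2 l1
  let m2 := pvMaxOverlap l1 l2
  if m1 < m2 then ((m2 : Int), String.ofList (l1 ++ l2.drop m2))
  else if 0 < m1 then ((m1 : Int), String.ofList (l2 ++ l1.drop m1))
  else (-1, "")

-- ===== PRECONDITION & SPEC =====
def Spec_find_overlapping_pair (s1 : String) (s2 : String) (out : Int × String) : Prop := out = find_overlapping_pair_alt s1 s2
instance (s1 : String) (s2 : String) (out : Int × String) : Decidable (Spec_find_overlapping_pair s1 s2 out) := by unfold Spec_find_overlapping_pair; infer_instance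

-- ===== CLAIM (what is proved, stated in full; the proofs are below) =====
def Claim_equal_find_overlapping_pair : Prop := ∀ (s1 : String) (s2 : String), Dom_find_overlapping_pair s1 s2 → Spec_find_overlapping_pair s1 s2 (find_overlapping_pair s1 s2)

-- ===== LEMMAS AND PROOFS =====

/-- Greatest k in [1, N] with p k, else 0 (the shape shared by both loop analyses). -/
def pvGmax (p : Nat → Bool) : Nat → Nat
  | 0 => 0
  | k + 1 => if p (k + 1) then k + 1 else pvGmax p k

lemma pvGmax_le (p : Nat → Bool) (N : Nat) : pvGmax p N ≤ N := by
  induction N with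
  | zero => simp [pvGmax]
  | succ k ih => simp only [pvGmax]; split <;> omega

lemma pvGmax_congr (p p' : Nat → Bool) (N : Nat)
    (h : ∀ k, 1 ≤ k → k ≤ N → p k = p' k) : pvGmax p N = pvGmax p' N := by
  induction N with
  | zero => rfl
  | succ k ih =>
      simp only [pvGmax, h (k + 1) (by omega) (by omega)]
      rw [ih (fun j h1 h2 => h j h1 (by omega))]

lemma pvGmax_pred (p : Nat → Bool) (N : Nat) :
    pvGmax p N = 0 ∨ p (pvGmax p N) = true := by
  induction N with
  | zero => left; rfl
  | succ k ih =>
      simp only [pvGmax]; split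
      · right; assumption
      · exact ih

lemma pvGmax_ge (p : Nat → Bool) (N k : Nat) (h1 : 1 ≤ k) (h2 : k ≤ N) (hp : p k = true) :
    k ≤ pvGmax p N := by
  induction N with
  | zero => omega
  | succ n ih =>
      simp only [pvGmax]; split
      · omega
      · rename_i hfalse
        by_cases hk : k = n + 1
        · rw [hk] at hp; rw [hp] at hfalse; exact absurd rfl hfalse
        · exact ih (by omega)

lemma pvGmax_eq_of (p : Nat → Bool) (N k : Nat) (hk : k ≤ N)
    (hp : k = 0 ∨ p k = true) (hmax : ∀ j, k < j → j ≤ N → p j = false) :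
    pvGmax p N = k := by
  induction N with
  | zero => simp only [pvGmax]; omega
  | succ n ih =>
      simp only [pvGmax]; split
      · rename_i htrue
        by_cases hkn : k = n + 1
        · omega
        · rw [hmax (n + 1) (by omega) (by omega)] at htrue; exact absurd htrue (by simp)
      · rename_i hfalse
        have hk' : k ≤ n := by
          rcases hp with rfl | hp
          · omega
          · by_contra h
            have : k = n + 1 := by omega
            rw [this] at hp; rw [hp] at hfalse; exact absurd rfl hfalse
        exact ih hk' (fun j hj1 hj2 => hmax j hj1 (by omega))

/-- Running one of A's loops: the ascending max-accumulator fold picks the greatest matching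
    index in [1, N] exceeding the initial maximum, else leaves the state unchanged. -/
lemma pvFoldRun (q : Int → Bool) (g : Int → List Char) (m0 : Int) (c0 : List Char) (N : Nat) :
    (PySem.List.pyRange 1 (1 + (N : Int)) 1).foldl
      (fun st i => if q i then (if st.1 < i then (i, g i) else st) else st) (m0, c0)
    = (if 0 < pvGmax (fun k => q (k : Int)) N ∧ m0 < ((pvGmax (fun k => q (k : Int)) N : Nat) : Int)
        then (((pvGmax (fun k => q (k : Int)) N : Nat) : Int), g ((pvGmax (fun k => q (k : Int)) N : Nat) : Int))
        else (m0, c0)) := by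
  induction N with
  | zero =>
      rw [PySem.List.pyRange_one_eq_nil (by omega)]
      simp [pvGmax]
  | succ k ih =>
      have hcast : (1 : Int) + ((k + 1 : Nat) : Int) = (1 + (k : Int)) + 1 := by push_cast; ring
      have h1k : (((k + 1 : Nat)) : Int) = (1 : Int) + (k : Int) := by push_cast; ring
      rw [hcast, PySem.List.pyRange_one_succ_right (by omega), List.foldl_append, ih]
      have hle := pvGmax_le (fun j => q (j : Int)) k
      simp only [List.foldl_cons, List.foldl_nil, pvGmax]
      by_cases hq : q (1 + (k : Int)) = true
      · have hq2 : q ((k : Int) + 1) = true := by rw [show (k : Int) + 1 = 1 + (k : Int) by ring]; exact hq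
        have h1k' : (1 : Int) + (k : Int) = (k : Int) + 1 := by ring
        by_cases hC : 0 < pvGmax (fun j => q (j : Int)) k ∧ m0 < ((pvGmax (fun j => q (j : Int)) k : Nat) : Int)
        · obtain ⟨hC1, hC2⟩ := hC
          have hlt : ((pvGmax (fun j => q (j : Int)) k : Nat) : Int) < 1 + (k : Int) := by omega
          have hm : m0 < (k : Int) + 1 := by omega
          have hlt2 : ¬ k < pvGmax (fun j => q (j : Int)) k := by omega
          simp [hq2, hC1, hC2, hm, hlt2, h1k']
        · by_cases hm : m0 < 1 + (k : Int)
          · have hm' : m0 < (k : Int) + 1 := by omega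
            simp [hq2, hC, hm', h1k']
          · have hm' : ¬ m0 < (k : Int) + 1 := by omega
            simp [hq2, hC, hm', h1k']
      · have hq2 : ¬ q ((k : Int) + 1) = true := by rw [show (k : Int) + 1 = 1 + (k : Int) by ring]; exact hq
        simp [hq, hq2]

-- ===== KMP analysis: borders =====

/-- k is a border of the length-j prefix of t (pointwise form, total via getD). -/
def pvBord (t : List Char) (j k : Nat) : Bool :=
  decide (∀ x, x < k → t.getD x ' ' = t.getD (j - k + x) ' ')

lemma pvBord_iff (t : List Char) (j k : Nat) :
    pvBord t j k = true ↔ ∀ x, x < k → t.getD x ' ' = t.getD (j - k + x) ' ' := by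
  simp [pvBord]

lemma pvBord_zero (t : List Char) (j : Nat) : pvBord t j 0 = true := by
  rw [pvBord_iff]; intro x hx; omega

lemma pvBord_trans (t : List Char) (j K b : Nat) (hKj : K ≤ j) (hbK : b ≤ K)
    (h1 : pvBord t j K = true) (h2 : pvBord t K b = true) : pvBord t j b = true := by
  rw [pvBord_iff] at *
  intro x hx
  rw [h2 x hx]
  have h3 := h1 (K - b + x) (by omega)
  have e : j - K + (K - b + x) = j - b + x := by omega
  rw [e] at h3
  exact h3

lemma pvBord_down (t : List Char) (j K b : Nat) (hKj : K ≤ j) (hbK : b ≤ K)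
    (h1 : pvBord t j K = true) (h2 : pvBord t j b = true) : pvBord t K b = true := by
  rw [pvBord_iff] at *
  intro x hx
  rw [h2 x hx]
  have h3 := h1 (K - b + x) (by omega)
  have e : j - K + (K - b + x) = j - b + x := by omega
  rw [e] at h3
  exact h3.symm

lemma pvBord_ext (t : List Char) (i B : Nat) (h1 : 1 ≤ B) (h2 : B ≤ i) :
    pvBord t (i + 1) B = true ↔
      (pvBord t i (B - 1) = true ∧ t.getD (B - 1) ' ' = t.getD i ' ') := by
  rw [pvBord_iff, pvBord_iff]
  constructor
  · intro h
    refine ⟨?_, ?_⟩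
    · intro x hx
      have hh := h x (by omega)
      have e : i + 1 - B + x = i - (B - 1) + x := by omega
      rw [e] at hh; exact hh
    · have hh := h (B - 1) (by omega)
      have e : i + 1 - B + (B - 1) = i := by omega
      rw [e] at hh; exact hh
  · rintro ⟨hb, hc⟩ x hx
    by_cases hx1 : x = B - 1
    · have e : i + 1 - B + x = i := by omega
      rw [e, hx1]; exact hc
    · have hh := hb x (by omega)
      have e : i - (B - 1) + x = i + 1 - B + x := by omega
      rw [e] at hh; exact hh

/-- Longest proper border of the length-j prefix of t. -/
def pvLbord (t : List Char) (j : Nat) : Nat :=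
  pvGmax (pvBord t j) (j - 1)

lemma pvLbord_le (t : List Char) (j : Nat) : pvLbord t j ≤ j - 1 :=
  pvGmax_le _ _

lemma pvLbord_bord (t : List Char) (j : Nat) : pvBord t j (pvLbord t j) = true := by
  rcases pvGmax_pred (pvBord t j) (j - 1) with h | h
  · unfold pvLbord; rw [h]; exact pvBord_zero t j
  · exact h

lemma pvLbord_ge (t : List Char) (j b : Nat) (hb : pvBord t j b = true) (hle : b ≤ j - 1) :
    b ≤ pvLbord t j := by
  rcases Nat.eq_zero_or_pos b with rfl | h1
  · exact Nat.zero_le _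
  · exact pvGmax_ge _ _ _ h1 hle hb

/-- The descend loop finds the largest border of the length-i prefix whose next character is c. -/
lemma pvDescend_spec (t : List Char) (p : List Nat) (c : Char) (i : Nat) (hi : 1 ≤ i)
    (hp : ∀ j, j + 1 ≤ i - 1 → p.getD j 0 = pvLbord t (j + 1)) :
    ∀ k, pvBord t i k = true → k ≤ i - 1 →
      (pvDescend t p c k = 0 ∨ (c == t.getD (pvDescend t p c k) ' ') = true) ∧
      pvBord t i (pvDescend t p c k) = true ∧
      pvDescend t p c k ≤ k ∧
      (∀ b, pvBord t i b = true → b ≤ k → (c == t.getD b ' ') = true → b ≤ pvDescend t p c k) := by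
  intro k
  induction k using Nat.strong_induction_on with
  | _ k ih =>
    intro hk hki
    match k with
    | 0 =>
        rw [pvDescend]
        refine ⟨Or.inl rfl, pvBord_zero t i, le_refl _, ?_⟩
        intro b _ hb _; omega
    | k' + 1 =>
        rw [pvDescend]
        by_cases hc : (c == t.getD (k' + 1) ' ') = true
        · rw [if_pos hc]
          exact ⟨Or.inr hc, hk, le_refl _, fun b _ hb _ => hb⟩
        · rw [if_neg hc]
          have hpk : p.getD k' 0 = pvLbord t (k' + 1) := hp k' (by omega)
          have hlb : pvLbord t (k' + 1) ≤ k' := by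
            have := pvLbord_le t (k' + 1); omega
          have hk2 : min (p.getD k' 0) k' = pvLbord t (k' + 1) := by rw [hpk]; omega
          rw [hk2]
          have hbord2 : pvBord t i (pvLbord t (k' + 1)) = true :=
            pvBord_trans t i (k' + 1) _ (by omega) (by omega) hk (pvLbord_bord t (k' + 1))
          obtain ⟨I1, I2, I3, I4⟩ := ih (pvLbord t (k' + 1)) (by omega) hbord2 (by omega)
          refine ⟨I1, I2, by omega, ?_⟩
          intro b hb hble hbc
          by_cases hbeq : b = k' + 1
          · rw [hbeq] at hbc; exact absurd hbc hc
          · have hbk' : pvBord t (k' + 1) b = true :=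
              pvBord_down t i (k' + 1) b (by omega) (by omega) hk hb
            have : b ≤ pvLbord t (k' + 1) := pvLbord_ge t (k' + 1) b hbk' (by omega)
            exact I4 b hb this hbc

/-- The post-descend increment computes the longest border of the extended prefix. -/
lemma pvStep_lbord (t : List Char) (i : Nat) (hi : 1 ≤ i) (r : Nat)
    (hr0 : r = 0 ∨ (t.getD i ' ' == t.getD r ' ') = true)
    (hrb : pvBord t i r = true) (hri : r ≤ i - 1)
    (hmax : ∀ b, pvBord t i b = true → b ≤ i - 1 → (t.getD i ' ' == t.getD b ' ') = true → b ≤ r) :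
    (if t.getD i ' ' == t.getD r ' ' then r + 1 else r) = pvLbord t (i + 1) := by
  unfold pvLbord
  rw [Nat.add_sub_cancel]
  by_cases hm : (t.getD i ' ' == t.getD r ' ') = true
  · rw [if_pos hm]
    symm
    apply pvGmax_eq_of _ _ _ (by omega)
    · right
      apply (pvBord_ext t i (r + 1) (by omega) (by omega)).mpr
      refine ⟨by simpa using hrb, ?_⟩
      simpa using (beq_iff_eq.mp hm).symm
    · intro j hj1 hj2
      rw [Bool.eq_false_iff]
      intro hbj
      obtain ⟨hb1, hb2⟩ := (pvBord_ext t i j (by omega) hj2).mp hbj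
      have := hmax (j - 1) hb1 (by omega) (beq_iff_eq.mpr hb2.symm)
      omega
  · have hr : r = 0 := by
      rcases hr0 with h | h
      · exact h
      · exact absurd h hm
    rw [if_neg hm, hr]
    symm
    apply pvGmax_eq_of _ _ _ (by omega) (Or.inl rfl)
    intro j hj1 hj2
    rw [Bool.eq_false_iff]
    intro hbj
    obtain ⟨hb1, hb2⟩ := (pvBord_ext t i j (by omega) hj2).mp hbj
    have hle := hmax (j - 1) hb1 (by omega) (beq_iff_eq.mpr hb2.symm)
    have hj : j = 1 := by omega
    rw [hj] at hb2
    rw [hr] at hm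
    exact hm (beq_iff_eq.mpr (by simpa using hb2.symm))

/-- Invariant of the prefix-function construction loop. -/
lemma pvPi_inv (t : List Char) :
    ∀ M, M + 1 ≤ t.length →
      ((List.range' 1 M).foldl (pvPiStep t) (List.replicate t.length 0, 0)).1.length = t.length ∧
      ((List.range' 1 M).foldl (pvPiStep t) (List.replicate t.length 0, 0)).2 = pvLbord t (M + 1) ∧
      (∀ j, j ≤ M →
        ((List.range' 1 M).foldl (pvPiStep t) (List.replicate t.length 0, 0)).1.getD j 0
          = pvLbord t (j + 1)) := by
  intro M
  induction M with
  | zero =>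
      intro _
      refine ⟨by simp, ?_, ?_⟩
      · simp [pvLbord, pvGmax]
      · intro j hj
        have : j = 0 := by omega
        rw [this]
        simp [pvLbord, pvGmax, List.getD]
  | succ M ih =>
      intro hM
      obtain ⟨hlen, hk, hpj⟩ := ih (by omega)
      rw [List.range'_concat, List.foldl_append, List.foldl_cons, List.foldl_nil]
      set st := (List.range' 1 M).foldl (pvPiStep t) (List.replicate t.length 0, 0) with hst
      have hidx : 1 + 1 * M = M + 1 := by omega
      rw [hidx]
      unfold pvPiStep
      have hp' : ∀ j, j + 1 ≤ (M + 1) - 1 → st.1.getD j 0 = pvLbord t (j + 1) := by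
        intro j hj; exact hpj j (by omega)
      have hkb : pvBord t (M + 1) st.2 = true := by rw [hk]; exact pvLbord_bord t (M + 1)
      have hkle : st.2 ≤ (M + 1) - 1 := by rw [hk]; have := pvLbord_le t (M + 1); omega
      obtain ⟨D1, D2, D3, D4⟩ :=
        pvDescend_spec t st.1 (t.getD (M + 1) ' ') (M + 1) (by omega) hp' st.2 hkb hkle
      set r := pvDescend t st.1 (t.getD (M + 1) ' ') st.2 with hr
      have hmax' : ∀ b, pvBord t (M + 1) b = true → b ≤ (M + 1) - 1 →
          (t.getD (M + 1) ' ' == t.getD b ' ') = true → b ≤ r := by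
        intro b hb hble hbc
        have : b ≤ st.2 := by
          rw [hk]; exact pvLbord_ge t (M + 1) b hb (by omega)
        exact D4 b hb this hbc
      have hstep := pvStep_lbord t (M + 1) (by omega) r D1 D2 (by omega) hmax'
      refine ⟨by simpa using hlen, by simpa using hstep, ?_⟩
      intro j hj
      by_cases hjM : j = M + 1
      · rw [hjM]
        simp only [List.getD]
        rw [List.getElem?_set_self (by omega)]
        simpa using hstep
      · have hj' : j ≤ M := by omega
        simp only [List.getD]
        rw [List.getElem?_set_ne (by omega)]
        have := hpj j hj'
        simpa [List.getD] using this

/-- The finished prefix function is the longest-border table. -/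
lemma pvPi_getD (t : List Char) (ht : 1 ≤ t.length) (j : Nat) (hj : j ≤ t.length - 1) :
    (pvPi t).getD j 0 = pvLbord t (j + 1) := by
  unfold pvPi
  exact (pvPi_inv t (t.length - 1) (by omega)).2.2 j hj

/-- The failure-chain descent returns the greatest border of t shorter than m. -/
lemma pvChain_spec (t : List Char) (ht : 1 ≤ t.length) (m : Nat) (hm1 : 1 ≤ m) :
    ∀ k, pvBord t t.length k = true → k ≤ t.length - 1 →
      (∀ b, pvBord t t.length b = true → b ≤ m - 1 → b ≤ k) →
      pvChain (pvPi t) m k = pvGmax (pvBord t t.length) (m - 1) := by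
  intro k
  induction k using Nat.strong_induction_on with
  | _ k ih =>
    intro hk hki hinv
    match k with
    | 0 =>
        rw [pvChain]
        symm
        apply pvGmax_eq_of _ _ _ (by omega) (Or.inl rfl)
        intro j hj1 hj2
        rw [Bool.eq_false_iff]
        intro hbj
        have := hinv j hbj (by omega)
        omega
    | k' + 1 =>
        rw [pvChain]
        by_cases hcond : m ≤ k' + 1
        · rw [if_pos hcond]
          have hpk : (pvPi t).getD k' 0 = pvLbord t (k' + 1) := pvPi_getD t ht k' (by omega)
          have hlb : pvLbord t (k' + 1) ≤ k' := by have := pvLbord_le t (k' + 1); omega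
          have hk2 : min ((pvPi t).getD k' 0) k' = pvLbord t (k' + 1) := by rw [hpk]; omega
          rw [hk2]
          apply ih (pvLbord t (k' + 1)) (by omega)
          · exact pvBord_trans t t.length (k' + 1) _ (by omega) (by omega) hk
              (pvLbord_bord t (k' + 1))
          · omega
          · intro b hb hble
            have hbk : pvBord t (k' + 1) b = true :=
              pvBord_down t t.length (k' + 1) b (by omega) (by omega) hk hb
            exact pvLbord_ge t (k' + 1) b hbk (by omega)
        · rw [if_neg hcond]
          symm
          apply pvGmax_eq_of _ _ _ (by omega) (Or.inr hk)
          intro j hj1 hj2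
          rw [Bool.eq_false_iff]
          intro hbj
          have := hinv j hbj (by omega)
          omega

/-- A border of b ++ a no longer than both pieces is exactly a suffix-prefix overlap. -/
lemma pvBord_iff_overlap (a b : List Char) (k : Nat) (hka : k ≤ a.length) (hkb : k ≤ b.length) :
    pvBord (b ++ a) ((b ++ a).length) k = true ↔ a.drop (a.length - k) = b.take k := by
  have hlen : (b ++ a).length = b.length + a.length := by simp
  have hget1 : ∀ x, x < k → (b ++ a).getD x ' ' = b.getD x ' ' := by
    intro x hx
    simp only [List.getD]
    rw [List.getElem?_append_left (by omega)]
  have hget2 : ∀ x, x < k →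
      (b ++ a).getD ((b ++ a).length - k + x) ' ' = a.getD (a.length - k + x) ' ' := by
    intro x hx
    simp only [List.getD]
    rw [List.getElem?_append_right (by omega)]
    have e : (b ++ a).length - k + x - b.length = a.length - k + x := by omega
    rw [e]
  rw [pvBord_iff]
  constructor
  · intro h
    apply List.ext_getElem
    · simp; omega
    · intro i h1 h2
      have hik : i < k := by
        have := h2
        simp only [List.length_take] at this
        omega
      have hh := h i hik
      rw [hget1 i hik, hget2 i hik] at hh
      have e1 : (a.drop (a.length - k))[i]'h1 = a[a.length - k + i]'(by omega) := by
        simp [List.getElem_drop]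
      have e2 : (b.take k)[i]'h2 = b[i]'(by omega) := by
        simp [List.getElem_take]
      rw [e1, e2]
      have g1 : b.getD i ' ' = b[i]'(by omega) := List.getD_eq_getElem b ' ' (by omega)
      have g2 : a.getD (a.length - k + i) ' ' = a[a.length - k + i]'(by omega) :=
        List.getD_eq_getElem a ' ' (by omega)
      rw [g1, g2] at hh
      exact hh.symm
  · intro h x hx
    rw [hget1 x hx, hget2 x hx]
    have h1 : (a.drop (a.length - k))[x]'(by simp; omega) = (b.take k)[x]'(by simp; omega) := by
      simp only [h]
    have e1 : (a.drop (a.length - k))[x]'(by simp; omega) = a[a.length - k + x]'(by omega) := by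
      simp [List.getElem_drop]
    have e2 : (b.take k)[x]'(by simp; omega) = b[x]'(by omega) := by
      simp [List.getElem_take]
    rw [e1, e2] at h1
    rw [List.getD_eq_getElem b ' ' (by omega), List.getD_eq_getElem a ' ' (by omega)]
    exact h1.symm

lemma pvBord_decide_eq (a b : List Char) (k : Nat) (hka : k ≤ a.length) (hkb : k ≤ b.length) :
    pvBord (b ++ a) ((b ++ a).length) k = (a.drop (a.length - k) == b.take k) := by
  rw [Bool.eq_iff_iff]
  rw [beq_iff_eq]
  exact pvBord_iff_overlap a b k hka hkb

/-- B's max_overlap computes the greatest overlap length, in pvGmax form. -/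
lemma pvMaxOverlap_eq_gmax (a b : List Char) (ha : a ≠ []) (hb : b ≠ []) :
    pvMaxOverlap a b
      = pvGmax (fun k => a.drop (a.length - k) == b.take k) (min a.length b.length - 1) := by
  unfold pvMaxOverlap
  have hne : (a.isEmpty || b.isEmpty) = false := by
    simp [ha, hb]
  rw [hne]
  simp only [Bool.false_eq_true, if_false]
  have ha1 : 1 ≤ a.length := List.length_pos_of_ne_nil ha
  have hb1 : 1 ≤ b.length := List.length_pos_of_ne_nil hb
  have hlen : (b ++ a).length = b.length + a.length := by simp
  have ht1 : 1 ≤ (b ++ a).length := by omega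
  have hm1 : 1 ≤ min a.length b.length := by omega
  have hpi : (pvPi (b ++ a)).getD ((b ++ a).length - 1) 0
      = pvLbord (b ++ a) ((b ++ a).length) := by
    have := pvPi_getD (b ++ a) ht1 ((b ++ a).length - 1) (le_refl _)
    rwa [Nat.sub_add_cancel ht1] at this
  rw [hpi]
  rw [pvChain_spec (b ++ a) ht1 (min a.length b.length) hm1
        (pvLbord (b ++ a) ((b ++ a).length))
        (pvLbord_bord _ _) (pvLbord_le _ _)
        (fun bd hbd hble => pvLbord_ge _ _ bd hbd (by omega))]
  apply pvGmax_congr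
  intro k h1 h2
  exact pvBord_decide_eq a b k (by omega) (by omega)

-- ===== VERDICT (by name: the statement is the Claim_ definition above) =====
theorem find_overlapping_pair_spec : Claim_equal_find_overlapping_pair := by
  intro s1 s2 _
  unfold Spec_find_overlapping_pair
  simp only [find_overlapping_pair, find_overlapping_pair_alt]
  have hn : min (PySem.Str.len s1) (PySem.Str.len s2)
      = ((min s1.toList.length s2.toList.length : Nat) : Int) := by
    simp [PySem.Str.len_eq, Nat.cast_min]
  rw [hn]
  cases hmin : min s1.toList.length s2.toList.length with
  | zero =>
      have h0 : s1.toList.length = 0 ∨ s2.toList.length = 0 := by omega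
      have hemp : (pvMaxOverlap s2.toList s1.toList = 0) ∧ (pvMaxOverlap s1.toList s2.toList = 0) := by
        rcases h0 with h | h
        · have : s1.toList.isEmpty = true := by simpa [List.isEmpty_iff, List.length_eq_zero_iff] using h
          constructor <;> simp [pvMaxOverlap, this]
        · have : s2.toList.isEmpty = true := by simpa [List.isEmpty_iff, List.length_eq_zero_iff] using h
          constructor <;> simp [pvMaxOverlap, this]
      rw [PySem.List.pyRange_one_eq_nil (by simp), List.foldl_nil, List.foldl_nil,
        hemp.1, hemp.2]
      norm_num
  | succ N =>
      have hrange : ((N + 1 : Nat) : Int) = 1 + (N : Int) := by push_cast; ring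
      have hsub : (N + 1) - 1 = N := by omega
      have h21 : min s2.toList.length s1.toList.length = N + 1 := by
        rw [Nat.min_comm]; exact hmin
      have hl1 : 1 ≤ s1.toList.length := by omega
      have hl2 : 1 ≤ s2.toList.length := by omega
      have hne1 : s1.toList ≠ [] := by
        intro h; rw [h] at hl1; simp at hl1
      have hne2 : s2.toList ≠ [] := by
        intro h; rw [h] at hl2; simp at hl2
      have hb1 : pvMaxOverlap s2.toList s1.toList
          = pvGmax (fun k => PySem.List.slice s1.toList none (some (k : Int))
              == PySem.List.slice s2.toList (some (-(k : Int))) none) N := by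
        rw [pvMaxOverlap_eq_gmax s2.toList s1.toList hne2 hne1, h21, hsub]
        apply pvGmax_congr
        intro k h1 _
        rw [PySem.List.slice_to_natCast, PySem.List.slice_from_neg_natCast _ _ h1]
        exact Bool.beq_comm
      have hb2 : pvMaxOverlap s1.toList s2.toList
          = pvGmax (fun k => PySem.List.slice s1.toList (some (-(k : Int))) none
              == PySem.List.slice s2.toList none (some (k : Int))) N := by
        rw [pvMaxOverlap_eq_gmax s1.toList s2.toList hne1 hne2, hmin, hsub]
        apply pvGmax_congr
        intro k h1 _
        rw [PySem.List.slice_to_natCast, PySem.List.slice_from_neg_natCast _ _ h1]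
      rw [hrange, hb1, hb2,
        pvFoldRun (fun i => PySem.List.slice s1.toList none (some i)
            == PySem.List.slice s2.toList (some (-i)) none)
          (fun i => s2.toList ++ PySem.List.slice s1.toList (some i) none) (-1) [] N]
      set G1 := pvGmax (fun k => PySem.List.slice s1.toList none (some (k : Int))
          == PySem.List.slice s2.toList (some (-(k : Int))) none) N with hG1
      set G2 := pvGmax (fun k => PySem.List.slice s1.toList (some (-(k : Int))) none
          == PySem.List.slice s2.toList none (some (k : Int))) N with hG2
      by_cases h1 : 0 < G1
      · rw [if_pos ⟨h1, by omega⟩,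
          pvFoldRun (fun i => PySem.List.slice s1.toList (some (-i)) none
              == PySem.List.slice s2.toList none (some i))
            (fun i => s1.toList ++ PySem.List.slice s2.toList (some i) none) ((G1 : Nat) : Int)
            (s2.toList ++ PySem.List.slice s1.toList (some ((G1 : Nat) : Int)) none) N]
        by_cases h12 : G1 < G2
        · rw [if_pos ⟨by omega, by exact_mod_cast h12⟩, if_pos h12]
          rw [PySem.List.slice_from_natCast]
        · rw [if_neg (by omega), if_neg h12, if_pos h1]
          rw [PySem.List.slice_from_natCast]
      · rw [if_neg (by omega),
          pvFoldRun (fun i => PySem.List.slice s1.toList (some (-i)) none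
              == PySem.List.slice s2.toList none (some i))
            (fun i => s1.toList ++ PySem.List.slice s2.toList (some i) none) (-1) [] N]
        by_cases h2 : 0 < G2
        · rw [if_pos ⟨h2, by omega⟩, if_pos (by omega), PySem.List.slice_from_natCast]
        · rw [if_neg (by omega), if_neg (by omega), if_neg h1]
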